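-- pv_equiv track=rewrite | github.com/ivan-paz/InferenceRules | compare_partitions_volumes.py | simplify_volume
-- ===== SOURCE A (Python) =====
-- from copy import deepcopy
--
-- def simplify_volume(volume):
--     simplified = [ ]
--     for i in volume:
--         current = deepcopy(i)
--         for j in volume:
--             if (i!=j) and (i[1] == j[1]):
--                 current[0] = current[0] + j[0]
--         if current not in simplified:
--             simplified = simplified + [current]
--     return simplified
-- ===== SOURCE B (Python) =====
-- def simplify_volume(volume):
--     key_total = {}
--     count = {}
--     for v in volume:
--         key_total[v[1]] = key_total.get(v[1], 0) + v[0]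
--         t = tuple(v)
--         count[t] = count.get(t, 0) + 1
--     result = []
--     seen = set()
--     for v in volume:
--         cur = [key_total[v[1]] - v[0] * (count[tuple(v)] - 1)] + v[1:]
--         t = tuple(cur)
--         if t not in seen:
--             seen.add(t)
--             result.append(cur)
--     return result
-- ===== Notes on version B (the rewrite author's own statement) =====
-- stated objective: alternative
-- what changed: Replaces A's nested per-element re-summing of same-key values and list-membership dedup with a single dict-building pass (per-key totals and exact-element counts) followed by one output pass computing key_total - v[0]*(count-1) and deduplicating via a hash set; complexities differ (O(n^2*m) vs O(n*m)) but a timing run could not measure a speedup here.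
-- outside the precondition, e.g. on simplify_volume([[]]): A returns [[]], B raises IndexError; on simplify_volume([[0], [0]]): A returns [[0]], B raises IndexError
import Mathlib
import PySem

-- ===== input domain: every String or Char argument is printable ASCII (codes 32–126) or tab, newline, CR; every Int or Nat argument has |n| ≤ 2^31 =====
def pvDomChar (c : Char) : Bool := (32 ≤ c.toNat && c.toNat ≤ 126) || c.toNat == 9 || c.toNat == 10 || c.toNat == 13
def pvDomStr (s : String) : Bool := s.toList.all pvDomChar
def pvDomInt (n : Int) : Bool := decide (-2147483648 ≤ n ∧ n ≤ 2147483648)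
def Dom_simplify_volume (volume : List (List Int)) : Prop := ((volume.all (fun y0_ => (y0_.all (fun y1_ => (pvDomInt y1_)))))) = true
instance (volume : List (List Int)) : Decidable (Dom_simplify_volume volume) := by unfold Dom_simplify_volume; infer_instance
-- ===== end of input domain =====

-- B replaces A's quadratic per-element re-summing and list dedup by one dict-building pass
-- plus one linear output pass (objective: alternative single-pass algorithm).

-- ===== PORT A =====
def simplify_volume (volume : List (List Int)) : List (List Int) :=
  volume.foldl (fun simplified i =>
    let current := volume.foldl (fun current j =>
      if i ≠ j ∧ PySem.List.pyGetD i 1 0 = PySem.List.pyGetD j 1 0 then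
        PySem.List.pySetD current 0 (PySem.List.pyGetD current 0 0 + PySem.List.pyGetD j 0 0)
      else current) i
    if current ∉ simplified then simplified ++ [current] else simplified) []

-- ===== PORT B =====
def simplify_volume_alt (volume : List (List Int)) : List (List Int) :=
  let key_total : PySem.Dict Int Int := volume.foldl (fun d v =>
    d.insert (PySem.List.pyGetD v 1 0) (d.getD (PySem.List.pyGetD v 1 0) 0 + PySem.List.pyGetD v 0 0))
    PySem.Dict.empty
  let count : PySem.Dict (List Int) Int := volume.foldl (fun d v =>
    d.insert v (d.getD v 0 + 1)) PySem.Dict.empty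
  (volume.foldl (fun (acc : List (List Int) × PySem.Set (List Int)) v =>
    let cur := (key_total.getD (PySem.List.pyGetD v 1 0) 0
                - PySem.List.pyGetD v 0 0 * (count.getD v 0 - 1)) :: PySem.List.slice v (some 1) none
    if PySem.Set.contains acc.2 cur then acc
    else (acc.1 ++ [cur], PySem.Set.add acc.2 cur)) ([], PySem.Set.empty)).1

-- ===== PRECONDITION & SPEC =====
-- Pre_ excludes inputs with an element shorter than 2: there B always raises IndexError on v[1],
-- and A also raises except when every short element only ever meets equal elements (e.g. [[]]),
-- where A's i[1] is skipped by short-circuiting and A returns.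
def Pre_simplify_volume (volume : List (List Int)) : Prop :=
  (volume.all (fun v => 2 ≤ v.length)) = true
instance (volume : List (List Int)) : Decidable (Pre_simplify_volume volume) := by
  unfold Pre_simplify_volume; infer_instance
def pvWitness_simplify_volume : List (List Int) := [[1, 2], [3, 2], [1, 2], [5, 7]]
def Spec_simplify_volume (volume : List (List Int)) (out : List (List Int)) : Prop := out = simplify_volume_alt volume
instance (volume : List (List Int)) (out : List (List Int)) : Decidable (Spec_simplify_volume volume out) := by unfold Spec_simplify_volume; infer_instance

-- ===== CLAIM (what is proved, stated in full; the proofs are below) =====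
def Claim_equal_simplify_volume : Prop := ∀ (volume : List (List Int)), Dom_simplify_volume volume → Pre_simplify_volume volume → Spec_simplify_volume volume (simplify_volume volume)

-- ===== LEMMAS AND PROOFS =====

theorem pySetD_zero_cons (a v : Int) (t : List Int) :
    PySem.List.pySetD (a :: t) 0 v = v :: t := by
  simp [PySem.List.pySetD, PySem.List.pySet?, PySem.List.pyIdx?]

theorem inner_fold_A (l : List (List Int)) (P : List Int → Prop) [DecidablePred P]
    (a : Int) (t : List Int) :
    l.foldl (fun current j =>
      if P j then
        PySem.List.pySetD current 0 (PySem.List.pyGetD current 0 0 + PySem.List.pyGetD j 0 0)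
      else current) (a :: t)
    = (a + ((l.filter (fun j => decide (P j))).map (fun j => PySem.List.pyGetD j 0 0)).sum) :: t := by
  induction l generalizing a with
  | nil => simp
  | cons h l ih =>
    by_cases hp : P h
    · simp [hp, List.foldl_cons, pySetD_zero_cons,
        PySem.List.pyGetD_zero_cons, ih, add_assoc]
    · simp [hp, List.foldl_cons, ih]

theorem key_total_getD (l : List (List Int)) (d : PySem.Dict Int Int) (k : Int) :
    (l.foldl (fun d v =>
      d.insert (PySem.List.pyGetD v 1 0) (d.getD (PySem.List.pyGetD v 1 0) 0 + PySem.List.pyGetD v 0 0)) d).getD k 0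
    = d.getD k 0 + ((l.filter (fun v => PySem.List.pyGetD v 1 0 == k)).map (fun v => PySem.List.pyGetD v 0 0)).sum := by
  induction l generalizing d with
  | nil => simp
  | cons h l ih =>
    by_cases hk : PySem.List.pyGetD h 1 0 = k
    · simp [List.foldl_cons, ih, hk, add_assoc]
    · simp [List.foldl_cons, ih, PySem.Dict.getD_insert, hk, Ne.symm hk]

-- split the same-key sum by whether the element equals i
theorem sum_split (l : List (List Int)) (i : List Int) :
    ((l.filter (fun v => PySem.List.pyGetD v 1 0 == PySem.List.pyGetD i 1 0)).map
        (fun v => PySem.List.pyGetD v 0 0)).sum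
    = ((l.filter (fun j => decide (i ≠ j ∧ PySem.List.pyGetD i 1 0 = PySem.List.pyGetD j 1 0))).map
        (fun j => PySem.List.pyGetD j 0 0)).sum + (l.count i : Int) * PySem.List.pyGetD i 0 0 := by
  induction l with
  | nil => simp
  | cons h l ih =>
    by_cases he : h = i
    · subst he
      simp [ih]
      ring
    · by_cases hk : PySem.List.pyGetD h 1 0 = PySem.List.pyGetD i 1 0
      · simp [hk, he, Ne.symm he, ih]
        ring
      · have hne : ¬ (h = i) := he
        have hk' : ¬ (PySem.List.pyGetD i 1 0 = PySem.List.pyGetD h 1 0) := fun h' => hk h'.symm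
        simp [hne, hk, hk', ih]

-- the unified per-element value computed by both programs
def pvVal (volume : List (List Int)) (i : List Int) : Int :=
  PySem.List.pyGetD i 0 0 +
    ((volume.filter (fun j => decide (i ≠ j ∧ PySem.List.pyGetD i 1 0 = PySem.List.pyGetD j 1 0))).map
      (fun j => PySem.List.pyGetD j 0 0)).sum

-- set-pair dedup fold collapses to a plain list dedup fold
theorem dedup_pair_aux (g : List Int → List Int) (l : List (List Int)) (s : List (List Int)) :
    (l.foldl (fun (acc : List (List Int) × PySem.Set (List Int)) v =>
      if PySem.Set.contains acc.2 (g v) then acc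
      else (acc.1 ++ [g v], PySem.Set.add acc.2 (g v))) (s, s)).1
    = l.foldl (fun s v => if g v ∉ s then s ++ [g v] else s) s := by
  induction l generalizing s with
  | nil => simp
  | cons h l ih =>
    by_cases hm : g h ∈ s
    · simpa [List.foldl_cons, PySem.Set.contains, hm] using ih s
    · simpa [List.foldl_cons, PySem.Set.contains, PySem.Set.add, hm] using ih (s ++ [g h])

theorem dedup_pair (g : List Int → List Int) (l : List (List Int)) :
    (l.foldl (fun (acc : List (List Int) × PySem.Set (List Int)) v =>
      if PySem.Set.contains acc.2 (g v) then acc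
      else (acc.1 ++ [g v], PySem.Set.add acc.2 (g v))) ([], PySem.Set.empty)).1
    = l.foldl (fun s v => if g v ∉ s then s ++ [g v] else s) [] :=
  dedup_pair_aux g l []

-- ===== VERDICT (by name: the statement is the Claim_ definition above) =====
theorem simplify_volume_spec : Claim_equal_simplify_volume := by
  intro volume _hdom hpre
  unfold Spec_simplify_volume simplify_volume simplify_volume_alt
  dsimp only
  rw [dedup_pair]
  apply PySem.List.foldl_congr_mem
  intro acc i hi
  have hlen : 2 ≤ i.length := by
    simpa using (List.all_eq_true.mp hpre i hi)
  obtain ⟨x, t, rfl⟩ : ∃ x t, i = x :: t := by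
    cases i with
    | nil => simp at hlen
    | cons x t => exact ⟨x, t, rfl⟩
  rw [inner_fold_A]
  rw [key_total_getD, PySem.Dict.getD_foldl_insert_add_one]
  rw [sum_split]
  simp [PySem.List.slice_from_one, PySem.Dict.getD_empty]
  ring_nf
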